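-- pv_equiv track=rewrite | github.com/elpusk/public.lpu23x | code/python/PatternAnalysis/bin_operation.py | bin_find_pattern_in_2d_array
-- ===== SOURCE A (Python) =====
-- def bin_find_pattern_in_1d_array(array_bin, pattern):
--     pattern_length = len(pattern)
--     array_length = len(array_bin)
--     result = []
--     #
--     if(pattern_length > array_length):
--         return result
--     if(pattern_length == 0):
--         return result
--     if(array_length == 0):
--         return result
--     #
--     for i in range(array_length - pattern_length + 1):
--         if array_bin[i:i + pattern_length] == pattern:
--             result.append(i)
--     #
--     return result
--
-- def bin_find_pattern_in_2d_array(array_2d_bin, pattern):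
--     found = []
--     if len(array_2d_bin)==0:
--         return found
--     for ar in array_2d_bin:
--         pos = bin_find_pattern_in_1d_array(ar,pattern)
--         found.append(pos)
--     #
--     return found
-- ===== SOURCE B (Python) =====
-- def _kmp_fail(pattern):
--     # failure table: fail[q] = length of longest proper border of pattern[:q+1]
--     if not pattern:
--         return []
--     fail = [0]
--     k = 0
--     for q in range(1, len(pattern)):
--         while k > 0 and pattern[k] != pattern[q]:
--             k = fail[k - 1]
--         if pattern[k] == pattern[q]:
--             k += 1
--         fail.append(k)
--     return fail
--
--
-- def bin_find_pattern_in_2d_array(array_2d_bin, pattern):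
--     # Knuth-Morris-Pratt: one failure table for the pattern, then a single
--     # left-to-right pass per row with no slicing and no re-comparison.
--     m = len(pattern)
--     if m == 0:
--         return [[] for _ in array_2d_bin]
--     fail = _kmp_fail(pattern)
--     found = []
--     for ar in array_2d_bin:
--         res = []
--         k = 0
--         for i, x in enumerate(ar):
--             while k > 0 and pattern[k] != x:
--                 k = fail[k - 1]
--             if pattern[k] == x:
--                 k += 1
--             if k == m:
--                 res.append(i - m + 1)
--                 k = fail[m - 1]
--         found.append(res)
--     return found
-- ===== Notes on version B (the rewrite author's own statement) =====
-- stated objective: alternative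
-- what changed: replaces the per-position slice-and-compare scan with Knuth-Morris-Pratt: a failure table built once from the pattern and a single left-to-right pass per row that never re-examines row elements (asymptotically O(rows*(n+m)) vs O(rows*n*m), though CPython's C-level slice comparison makes A faster in wall-clock)
import Mathlib
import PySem

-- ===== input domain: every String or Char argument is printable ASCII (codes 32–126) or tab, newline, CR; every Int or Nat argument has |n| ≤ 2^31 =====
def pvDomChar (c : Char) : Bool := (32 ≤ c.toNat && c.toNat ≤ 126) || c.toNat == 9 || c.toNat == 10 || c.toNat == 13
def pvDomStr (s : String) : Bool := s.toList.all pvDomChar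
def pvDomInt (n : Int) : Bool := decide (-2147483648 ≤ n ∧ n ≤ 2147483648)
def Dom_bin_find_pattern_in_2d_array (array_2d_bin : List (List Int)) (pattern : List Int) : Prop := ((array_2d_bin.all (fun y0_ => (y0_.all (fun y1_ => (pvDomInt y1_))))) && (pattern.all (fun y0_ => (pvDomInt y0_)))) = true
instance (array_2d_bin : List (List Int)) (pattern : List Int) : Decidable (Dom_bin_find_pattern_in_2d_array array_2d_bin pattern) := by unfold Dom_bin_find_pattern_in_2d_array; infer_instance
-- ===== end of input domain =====

-- B replaces A's per-position slice-and-compare scan by Knuth–Morris–Pratt (failure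
-- table built once from the pattern, one left-to-right pass per row); same return value.

-- ===== PORT A =====
def bin_find_pattern_in_1d_array (array_bin : List Int) (pattern : List Int) : List Int :=
  let pattern_length := pattern.length
  let array_length := array_bin.length
  let result : List Int := []
  if pattern_length > array_length then result
  else if pattern_length = 0 then result
  else if array_length = 0 then result
  else
    (PySem.List.pyRange 0 ((array_length : Int) - (pattern_length : Int) + 1) 1).foldl
      (fun res i =>
        if PySem.List.slice array_bin (some i) (some (i + (pattern_length : Int))) = pattern
        then res ++ [i] else res) result

def bin_find_pattern_in_2d_array (array_2d_bin : List (List Int)) (pattern : List Int) : List (List Int) :=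
  let found : List (List Int) := []
  if array_2d_bin.length = 0 then found
  else array_2d_bin.foldl (fun found ar => found ++ [bin_find_pattern_in_1d_array ar pattern]) found

-- ===== PORT B =====
def pgetI (l : List Int) (i : Nat) : Int := l.getD i 0
def pgetN (l : List Nat) (i : Nat) : Nat := l.getD i 0

-- Python's `while k > 0 and pattern[k] != x: k = fail[k-1]` followed by
-- `if pattern[k] == x: k += 1`.  The `min … k'` is a totality guard only: the
-- failure table B builds always satisfies fail[j] ≤ j, so it never changes the value.
def kmpFall (fail : List Nat) (pattern : List Int) (x : Int) (k : Nat) : Nat :=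
  match k with
  | 0 => if pgetI pattern 0 = x then 1 else 0
  | (k' + 1) =>
    if pgetI pattern (k' + 1) = x then k' + 2
    else kmpFall fail pattern x (min (pgetN fail k') k')
termination_by k
decreasing_by omega

def kmpBuildGo (pattern : List Int) : Nat → Nat → List Nat → List Nat
  | 0, _, fail => fail
  | (r + 1), k, fail =>
    let k1 := kmpFall fail pattern (pgetI pattern fail.length) k
    kmpBuildGo pattern r k1 (fail ++ [k1])

def kmpFail (pattern : List Int) : List Nat :=
  if pattern.length = 0 then [] else kmpBuildGo pattern (pattern.length - 1) 0 [0]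

def kmpRowGo (pattern : List Int) (fail : List Nat) (m : Nat) : List Int → Nat → Nat → List Int → List Int
  | [], _, _, res => res
  | (x :: rest), i, k, res =>
    let k1 := kmpFall fail pattern x k
    if k1 = m then
      kmpRowGo pattern fail m rest (i + 1) (pgetN fail (m - 1)) (res ++ [(i : Int) - (m : Int) + 1])
    else kmpRowGo pattern fail m rest (i + 1) k1 res

def bin_find_pattern_in_2d_array_alt (array_2d_bin : List (List Int)) (pattern : List Int) : List (List Int) :=
  if pattern.length = 0 then array_2d_bin.map (fun _ => ([] : List Int))
  else
    let fail := kmpFail pattern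
    array_2d_bin.map (fun ar => kmpRowGo pattern fail pattern.length ar 0 0 [])

-- ===== PRECONDITION & SPEC =====
def Spec_bin_find_pattern_in_2d_array (array_2d_bin : List (List Int)) (pattern : List Int) (out : List (List Int)) : Prop := out = bin_find_pattern_in_2d_array_alt array_2d_bin pattern
instance (array_2d_bin : List (List Int)) (pattern : List Int) (out : List (List Int)) : Decidable (Spec_bin_find_pattern_in_2d_array array_2d_bin pattern out) := by unfold Spec_bin_find_pattern_in_2d_array; infer_instance

-- ===== CLAIM (what is proved, stated in full; the proofs are below) =====
def Claim_equal_bin_find_pattern_in_2d_array : Prop := ∀ (array_2d_bin : List (List Int)) (pattern : List Int), Dom_bin_find_pattern_in_2d_array array_2d_bin pattern → Spec_bin_find_pattern_in_2d_array array_2d_bin pattern (bin_find_pattern_in_2d_array array_2d_bin pattern)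

-- ===== LEMMAS AND PROOFS =====

-- `bigK P t b` = length of the longest prefix of P, of length ≤ b, that is a suffix of t.
def bigK (P t : List Int) (b : Nat) : Nat := Nat.findGreatest (fun j => P.take j <:+ t) b

-- the list of match start positions A computes, as a specification
def naiveStarts (P t : List Int) : List Int :=
  ((List.range (t.length + 1 - P.length)).filter
    (fun s => decide (P <:+ t.take (s + P.length)))).map (fun s => ((s : Nat) : Int))

lemma suffix_snoc_iff (u t : List Int) (a b : Int) :
    (u ++ [a] <:+ t ++ [b]) ↔ (u <:+ t ∧ a = b) := by
  rw [← List.reverse_prefix]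
  simp only [List.reverse_append, List.reverse_singleton, List.singleton_append,
    List.cons_prefix_cons]
  rw [List.reverse_prefix]
  tauto

lemma take_succ_pget (P : List Int) (j : Nat) (h : j < P.length) :
    P.take (j + 1) = P.take j ++ [pgetI P j] := by
  rw [List.take_add_one, pgetI, List.getD, List.getElem?_eq_getElem h]
  simp

lemma bigK_le (P t : List Int) (b : Nat) : bigK P t b ≤ b := Nat.findGreatest_le b

lemma bigK_suffix (P t : List Int) (b : Nat) : P.take (bigK P t b) <:+ t := by
  unfold bigK
  exact Nat.findGreatest_spec (P := fun j => P.take j <:+ t) (Nat.zero_le b) (List.nil_suffix : [] <:+ t)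

lemma compress (P t : List Int) (b : Nat) (hb : b ≤ P.length) {j : Nat} (hj : j ≤ b) :
    (P.take j <:+ t) ↔ (j ≤ bigK P t b ∧ P.take j <:+ P.take (bigK P t b)) := by
  constructor
  · intro h
    have h1 : j ≤ bigK P t b := Nat.le_findGreatest hj h
    refine ⟨h1, List.suffix_of_suffix_length_le h (bigK_suffix P t b) ?_⟩
    have := bigK_le P t b
    simp only [List.length_take]
    omega
  · rintro ⟨_, h2⟩
    exact h2.trans (bigK_suffix P t b)

lemma findGreatest_congr {p q : Nat → Prop} [DecidablePred p] [DecidablePred q] (b : Nat)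
    (h : ∀ j, j ≤ b → (p j ↔ q j)) : Nat.findGreatest p b = Nat.findGreatest q b := by
  induction b with
  | zero => rfl
  | succ n ih =>
    rw [Nat.findGreatest_succ, Nat.findGreatest_succ, ih (fun j hj => h j (by omega))]
    by_cases hq : q (n + 1)
    · simp [hq, (h (n + 1) le_rfl).mpr hq]
    · have hp : ¬ p (n + 1) := fun hp => hq ((h (n + 1) le_rfl).mp hp)
      simp [hq, hp]

lemma bigK_step (P t : List Int) (x : Int) (b : Nat) (hbm : b < P.length) :
    bigK P (t ++ [x]) (b + 1) = bigK P (P.take (bigK P t b) ++ [x]) (bigK P t b + 1) := by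
  have hkb_le : bigK P t b ≤ b := bigK_le P t b
  have key : ∀ j, 1 ≤ j → j ≤ b + 1 →
      ((P.take j <:+ t ++ [x]) ↔ (j ≤ bigK P t b + 1 ∧ P.take j <:+ P.take (bigK P t b) ++ [x])) := by
    intro j h1 h2
    obtain ⟨j', rfl⟩ : ∃ j', j = j' + 1 := ⟨j - 1, by omega⟩
    rw [take_succ_pget P j' (by omega), suffix_snoc_iff, suffix_snoc_iff,
      compress P t b (by omega) (show j' ≤ b by omega)]
    constructor
    · rintro ⟨⟨hj1, hj2⟩, hx⟩; exact ⟨by omega, hj2, hx⟩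
    · rintro ⟨hj1, hj2, hx⟩; exact ⟨⟨by omega, hj2⟩, hx⟩
  apply Nat.le_antisymm
  · rcases Nat.eq_zero_or_pos (bigK P (t ++ [x]) (b + 1)) with h0 | hpos
    · exact h0 ▸ Nat.zero_le _
    · have hspec : P.take (bigK P (t ++ [x]) (b + 1)) <:+ t ++ [x] := bigK_suffix P (t ++ [x]) (b + 1)
      have hle : bigK P (t ++ [x]) (b + 1) ≤ b + 1 := bigK_le P (t ++ [x]) (b + 1)
      have h := (key _ hpos hle).mp hspec
      exact Nat.le_findGreatest h.1 h.2
  · rcases Nat.eq_zero_or_pos (bigK P (P.take (bigK P t b) ++ [x]) (bigK P t b + 1)) with h0 | hpos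
    · exact h0 ▸ Nat.zero_le _
    · have hspec := bigK_suffix P (P.take (bigK P t b) ++ [x]) (bigK P t b + 1)
      have hle := bigK_le P (P.take (bigK P t b) ++ [x]) (bigK P t b + 1)
      have h : P.take (bigK P (P.take (bigK P t b) ++ [x]) (bigK P t b + 1)) <:+ t ++ [x] :=
        (key _ hpos (by omega)).mpr ⟨hle, hspec⟩
      exact Nat.le_findGreatest (by omega) h

lemma kmpFall_spec (P : List Int) (fail : List Nat) (x : Int) :
    ∀ k, k < P.length → (∀ q, q < k → pgetN fail q = bigK P (P.take (q + 1)) q) →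
      kmpFall fail P x k = bigK P (P.take k ++ [x]) (k + 1) := by
  intro k
  induction k using Nat.strong_induction_on with
  | _ k ih =>
    intro hk hf
    match k with
    | 0 =>
      rw [kmpFall]
      have h1 : P.take 1 = P.take 0 ++ [pgetI P 0] := take_succ_pget P 0 hk
      have : (P.take 1 <:+ ([] : List Int) ++ [x]) ↔ (pgetI P 0 = x) := by
        rw [h1, suffix_snoc_iff]; simp
      simp only [List.nil_append] at this
      unfold bigK
      rw [Nat.findGreatest_succ]
      simp only [List.take_zero, List.nil_append]
      by_cases h : pgetI P 0 = x
      · simp [h, this.mpr h]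
      · have hns : ¬ (List.take 1 P <:+ [x]) := fun hs => h (this.mp hs)
        simp [h, hns]
    | (k' + 1) =>
      rw [kmpFall]
      by_cases h : pgetI P (k' + 1) = x
      · simp only [h, if_true]
        have hmem : P.take (k' + 2) <:+ P.take (k' + 1) ++ [x] := by
          rw [take_succ_pget P (k' + 1) hk, h]
        unfold bigK
        exact (Nat.le_antisymm (Nat.findGreatest_le _) (Nat.le_findGreatest le_rfl hmem)).symm
      · simp only [h, if_false]
        have hk2 : pgetN fail k' = bigK P (P.take (k' + 1)) k' := hf k' (by omega)
        have hk2le : pgetN fail k' ≤ k' := by rw [hk2]; exact bigK_le _ _ _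
        rw [min_eq_left hk2le]
        have hrec := ih (pgetN fail k') (by omega) (by omega)
          (fun q hq => hf q (by omega))
        have hstep := bigK_step P (P.take (k' + 1)) x k' (by omega)
        have hnot : ¬ (P.take (k' + 2) <:+ P.take (k' + 1) ++ [x]) := by
          rw [take_succ_pget P (k' + 1) hk, suffix_snoc_iff]
          rintro ⟨-, hx⟩; exact h hx
        rw [hrec, hk2, ← hstep]
        -- drop the cap from k'+2 to k'+1: the predicate fails at k'+2
        have hs := Nat.findGreatest_succ
          (P := fun j => List.take j P <:+ List.take (k' + 1) P ++ [x]) (k' + 1)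
        unfold bigK
        rw [hs, if_neg hnot]

def failSpecN (P : List Int) (fail : List Nat) (n : Nat) : Prop :=
  ∀ q, q < n → pgetN fail q = bigK P (P.take (q + 1)) q

lemma pgetN_append_lt (l : List Nat) (a : Nat) (i : Nat) (h : i < l.length) :
    pgetN (l ++ [a]) i = pgetN l i := by
  simp [pgetN, List.getD, List.getElem?_append_left h]

lemma pgetN_append_self (l : List Nat) (a : Nat) :
    pgetN (l ++ [a]) l.length = a := by
  simp [pgetN, List.getD]

lemma buildGo_spec (P : List Int) :
    ∀ r k fail, fail.length + r = P.length → 0 < fail.length →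
      failSpecN P fail fail.length →
      k = bigK P (P.take fail.length) (fail.length - 1) →
      (kmpBuildGo P r k fail).length = P.length ∧ failSpecN P (kmpBuildGo P r k fail) P.length := by
  intro r
  induction r with
  | zero =>
    intro k fail hlen _ hspec _
    rw [kmpBuildGo]
    exact ⟨by omega, by rwa [show P.length = fail.length by omega]⟩
  | succ r ih =>
    intro k fail hlen hpos hspec hk
    rw [kmpBuildGo]
    have hq : fail.length < P.length := by omega
    have hkle : k ≤ fail.length - 1 := by
      rw [hk]; exact bigK_le _ _ _
    have hklt : k < P.length := by omega
    have hfall := kmpFall_spec P fail (pgetI P fail.length) k hklt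
      (fun q hq' => hspec q (by omega))
    have hstep := bigK_step P (P.take fail.length) (pgetI P fail.length) (fail.length - 1)
      (by omega)
    have hq1 : fail.length - 1 + 1 = fail.length := by omega
    rw [hq1] at hstep
    have hnew : kmpFall fail P (pgetI P fail.length) k = bigK P (P.take (fail.length + 1)) fail.length := by
      rw [hfall, hk, ← hstep, take_succ_pget P fail.length hq]
    have hspec' : failSpecN P (fail ++ [kmpFall fail P (pgetI P fail.length) k])
        (fail ++ [kmpFall fail P (pgetI P fail.length) k]).length := by
      intro q hq'
      simp only [List.length_append, List.length_cons, List.length_nil] at hq'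
      rcases Nat.lt_or_ge q fail.length with hlt | hge
      · rw [pgetN_append_lt _ _ _ hlt]; exact hspec q hlt
      · have hqe : q = fail.length := by omega
        subst hqe
        rw [pgetN_append_self, hnew]
    have hk' : kmpFall fail P (pgetI P fail.length) k =
        bigK P (P.take ((fail ++ [kmpFall fail P (pgetI P fail.length) k]).length))
          ((fail ++ [kmpFall fail P (pgetI P fail.length) k]).length - 1) := by
      simp only [List.length_append, List.length_cons, List.length_nil]
      rw [show fail.length + 1 - 1 = fail.length from by omega, hnew]
    exact ih _ _ (by simp only [List.length_append, List.length_cons, List.length_nil]; omega)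
      (by simp) hspec' hk'
lemma kmpFail_len_spec (P : List Int) (hm : 0 < P.length) :
    (kmpFail P).length = P.length ∧ failSpecN P (kmpFail P) P.length := by
  unfold kmpFail
  rw [if_neg (by omega)]
  apply buildGo_spec
  · simp; omega
  · simp
  · intro q hq
    simp only [List.length_cons, List.length_nil] at hq
    have hq0 : q = 0 := by omega
    subst hq0
    simp [pgetN, bigK, Nat.findGreatest]
  · simp [bigK]

lemma full_iff (P t : List Int) :
    bigK P t P.length = P.length ↔ P <:+ t := by
  constructor
  · intro h
    have := bigK_suffix P t P.length
    rwa [h, List.take_length] at this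
  · intro h
    refine Nat.le_antisymm (bigK_le _ _ _) ?_
    exact Nat.le_findGreatest le_rfl (by rwa [List.take_length])

lemma bigK_reset (P t : List Int) (h : P <:+ t) :
    bigK P P (P.length - 1) = bigK P t (P.length - 1) := by
  apply findGreatest_congr
  intro j hj
  constructor
  · intro hs; exact hs.trans h
  · intro hs
    apply List.suffix_of_suffix_length_le hs h
    simp only [List.length_take]; omega

lemma bigK_pred (P t : List Int) (hm : 0 < P.length) (h : bigK P t P.length ≠ P.length) :
    bigK P t P.length = bigK P t (P.length - 1) := by
  have hml : P.length = (P.length - 1) + 1 := by omega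
  rw [hml] at h ⊢
  unfold bigK at h ⊢
  rw [Nat.findGreatest_succ] at h ⊢
  by_cases hc : P.take (P.length - 1 + 1) <:+ t
  · simp [hc] at h
  · simp [hc]

lemma naive_snoc (P t : List Int) (x : Int) :
    naiveStarts P (t ++ [x]) =
      naiveStarts P t ++
        (if P <:+ t ++ [x] then [((t.length + 1 - P.length : Nat) : Int)] else []) := by
  by_cases hc : P.length ≤ t.length + 1
  · have hsplit : t.length + 1 + 1 - P.length = (t.length + 1 - P.length) + 1 := by omega
    unfold naiveStarts
    simp only [List.length_append, List.length_cons, List.length_nil]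
    rw [hsplit, List.range_succ, List.filter_append, List.map_append]
    congr 1
    · congr 1
      apply List.filter_congr
      intro s hs
      simp only [List.mem_range] at hs
      rw [List.take_append_of_le_length (by omega)]
    · have htake : (t ++ [x]).take (t.length + 1 - P.length + P.length) = t ++ [x] := by
        apply List.take_of_length_le
        simp; omega
      simp only [List.filter, htake]
      by_cases hp : P <:+ t ++ [x]
      · simp [hp]
      · simp [hp]
  · have h1 : t.length + 1 - P.length = 0 := by omega
    have hnot : ¬ P <:+ t ++ [x] := by
      intro h
      have := h.length_le
      simp at this
      omega
    unfold naiveStarts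
    rw [if_neg hnot]
    simp only [List.length_append, List.length_cons, List.length_nil]
    rw [show t.length + (0 + 1) + 1 - P.length = 0 from by omega, h1]
    simp

lemma rowGo_inv (P : List Int) (fail : List Nat) (hm : 0 < P.length)
    (hfail : failSpecN P fail P.length) :
    ∀ rest t k res, k = bigK P t (P.length - 1) → res = naiveStarts P t →
      kmpRowGo P fail P.length rest t.length k res = naiveStarts P (t ++ rest) := by
  intro rest
  induction rest with
  | nil => intro t k res hk hres; rw [kmpRowGo]; simp [hres]
  | cons x rest ih =>
    intro t k res hk hres
    rw [kmpRowGo]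
    have hklt : k < P.length := by
      have := bigK_le P t (P.length - 1); omega
    have hfall := kmpFall_spec P fail x k hklt (fun q hq => hfail q (by omega))
    have hstep := bigK_step P t x (P.length - 1) (by omega)
    have hm1 : P.length - 1 + 1 = P.length := by omega
    rw [hm1] at hstep
    have hk1 : kmpFall fail P x k = bigK P (t ++ [x]) P.length := by
      rw [hfall, hk, ← hstep]
    by_cases hmatch : kmpFall fail P x k = P.length
    · simp only [hmatch, if_true]
      have hsfx : P <:+ t ++ [x] := (full_iff P (t ++ [x])).mp (by rw [← hk1, hmatch])
      have hlen : P.length ≤ t.length + 1 := by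
        have := hsfx.length_le; simp at this; omega
      have hres' : res ++ [(t.length : Int) - (P.length : Int) + 1] = naiveStarts P (t ++ [x]) := by
        rw [naive_snoc P t x, if_pos hsfx, hres]
        congr 2
        omega
      have hknew : pgetN fail (P.length - 1) = bigK P (t ++ [x]) (P.length - 1) := by
        rw [hfail (P.length - 1) (by omega), hm1, List.take_length]
        exact bigK_reset P (t ++ [x]) hsfx
      have hgo := ih (t ++ [x]) (pgetN fail (P.length - 1))
        (res ++ [(t.length : Int) - (P.length : Int) + 1]) hknew hres'
      simpa using hgo
    · simp only [hmatch, if_false]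
      have hknew : kmpFall fail P x k = bigK P (t ++ [x]) (P.length - 1) := by
        rw [hk1]
        exact bigK_pred P (t ++ [x]) hm (by rw [← hk1]; exact hmatch)
      have hnot : ¬ P <:+ t ++ [x] := by
        intro hsfx
        have hfull := (full_iff P (t ++ [x])).mpr hsfx
        rw [← hk1] at hfull
        exact hmatch hfull
      have hres' : res = naiveStarts P (t ++ [x]) := by
        rw [naive_snoc P t x, if_neg hnot, hres, List.append_nil]
      have hgo := ih (t ++ [x]) (kmpFall fail P x k) res hknew hres'
      simpa using hgo

lemma bigK_nil (P : List Int) (b : Nat) (hb : b < P.length) : bigK P [] b = 0 := by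
  rcases Nat.eq_zero_or_pos (bigK P [] b) with h | h
  · exact h
  · have hs := bigK_suffix P [] b
    rw [List.suffix_nil] at hs
    have := congrArg List.length hs
    simp only [List.length_take, List.length_nil] at this
    have := bigK_le P [] b
    omega

lemma naive_nil (P : List Int) (hm : 0 < P.length) : naiveStarts P [] = [] := by
  unfold naiveStarts
  simp [show 0 + 1 - P.length = 0 by omega]

lemma slice_eq_iff (P ar : List Int) (k : Nat) (h : k + P.length ≤ ar.length) :
    ((ar.drop k).take P.length = P) ↔ (P <:+ ar.take (k + P.length)) := by
  rw [List.take_add]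
  constructor
  · intro he
    rw [he]
    exact List.suffix_append _ _
  · intro hs
    have hsfx : (ar.drop k).take P.length <:+ List.take k ar ++ List.take P.length (List.drop k ar) :=
      List.suffix_append _ _
    have hlen : ((ar.drop k).take P.length).length = P.length := by
      simp only [List.length_take, List.length_drop]; omega
    have hP := List.suffix_of_suffix_length_le hs hsfx (by omega)
    exact (List.IsSuffix.eq_of_length hP (by omega)).symm

lemma a_row (P ar : List Int) (hm : 0 < P.length) :
    bin_find_pattern_in_1d_array ar P = naiveStarts P ar := by
  unfold bin_find_pattern_in_1d_array
  by_cases hgt : P.length > ar.length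
  · rw [if_pos hgt]
    unfold naiveStarts
    rw [show ar.length + 1 - P.length = 0 by omega]
    simp
  · rw [if_neg hgt, if_neg (by omega), if_neg (by omega)]
    have hle : P.length ≤ ar.length := by omega
    rw [PySem.List.pyRange_one, List.foldl_map]
    have hn : (((ar.length : Int) - (P.length : Int) + 1) - 0).toNat = ar.length + 1 - P.length := by
      omega
    rw [hn]
    have hcong : List.foldl
        (fun (res : List Int) (k : Nat) =>
          if PySem.List.slice ar (some (0 + (k : Int))) (some (0 + (k : Int) + (P.length : Int))) = P
          then res ++ [0 + (k : Int)] else res) []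
        (List.range (ar.length + 1 - P.length)) =
      List.foldl
        (fun (res : List Int) (k : Nat) =>
          if (fun s => decide (P <:+ ar.take (s + P.length))) k = true
          then res ++ [((k : Nat) : Int)] else res) []
        (List.range (ar.length + 1 - P.length)) := by
      apply PySem.List.foldl_congr_mem
      intro acc k hk
      simp only [List.mem_range] at hk
      have hkle : k + P.length ≤ ar.length := by omega
      have hsl : PySem.List.slice ar (some (0 + (k : Int))) (some (0 + (k : Int) + (P.length : Int))) =
          (ar.drop k).take P.length := by
        rw [zero_add]
        exact PySem.List.slice_natCast_add ar k P.length
      rw [hsl, zero_add]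
      by_cases hp : P <:+ ar.take (k + P.length)
      · rw [if_pos ((slice_eq_iff P ar k hkle).mpr hp), if_pos (by simp [hp])]
      · rw [if_neg (fun he => hp ((slice_eq_iff P ar k hkle).mp he)), if_neg (by simp [hp])]
    rw [hcong, PySem.List.foldl_append_if]
    unfold naiveStarts
    simp

-- ===== VERDICT (by name: the statement is the Claim_ definition above) =====
theorem bin_find_pattern_in_2d_array_spec : Claim_equal_bin_find_pattern_in_2d_array := by
  intro arr P _
  unfold Spec_bin_find_pattern_in_2d_array bin_find_pattern_in_2d_array bin_find_pattern_in_2d_array_alt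
  by_cases harr : arr.length = 0
  · rw [List.length_eq_zero_iff] at harr
    subst harr
    by_cases hp : P.length = 0 <;> simp [hp]
  · rw [if_neg harr, PySem.List.foldl_append_singleton_eq_map, List.nil_append]
    by_cases hp : P.length = 0
    · rw [if_pos hp]
      apply List.map_congr_left
      intro ar _
      unfold bin_find_pattern_in_1d_array
      rw [if_neg (by omega), if_pos hp]
    · rw [if_neg hp]
      apply List.map_congr_left
      intro ar _
      have hm : 0 < P.length := by omega
      rw [a_row P ar hm]
      obtain ⟨hlen, hfs⟩ := kmpFail_len_spec P hm
      have h := rowGo_inv P (kmpFail P) hm hfs ar [] 0 []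
        (bigK_nil P (P.length - 1) (by omega)).symm (naive_nil P hm).symm
      simpa using h.symm
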